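-- pv_equiv track=rewrite | github.com/Tiagosvi/Introduccion-a-la-programacion-I | parcialPrimos.py | stock_productos
-- ===== SOURCE A (Python) =====
-- def minimo (cantidad:list[int]) -> int:
--     minimo = cantidad[0]
--     for i in range (1,len(cantidad)):
--         if cantidad[i] < minimo:
--             minimo = cantidad[i]
--
--     return minimo
--
-- def maximo (cantidad:list[int]) -> int:
--     maximo = cantidad[0]
--     for i in range (1,len(cantidad)):
--         if cantidad [i] >= maximo:
--             maximo = cantidad[i]
--
--     return maximo
--
-- def stock_productos (stock_cambios:list[tuple[(str,int)]]) -> dict[str,tuple[int,int]]: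
--     res:dict [str,tuple[int,int]] = {}
--     dictAux:dict[str,list[int]] = {}
--     lista:list[int] = []
--
--
--     for i in range (len(stock_cambios)):
--         if stock_cambios [i][0] not in dictAux:
--             dictAux[stock_cambios[i][0]] = [stock_cambios[i][1]]
--         else:
--             dictAux[stock_cambios[i][0]] += [stock_cambios[i][1]]
--
--
--     lista_claves: list[str] = list(dictAux.keys())
--     for i in range(len(lista_claves)):
--         historial:list[int] = dictAux[lista_claves[i]]
--         res[lista_claves[i]] = (minimo(historial),maximo(historial))
--     return res
-- ===== SOURCE B (Python) =====
-- def stock_productos(stock_cambios):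
--     res = {}
--     for name, q in stock_cambios:
--         if name not in res:
--             res[name] = (q, q)
--         else:
--             lo, hi = res[name]
--             res[name] = (min(lo, q), max(hi, q))
--     return res
-- ===== Notes on version B (the rewrite author's own statement) =====
-- stated objective: simpler
-- what changed: Single pass that keeps a running (min,max) pair per product in one dict, instead of first grouping all quantities into per-product lists and then scanning each list twice with helper min/max loops.
import Mathlib
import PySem

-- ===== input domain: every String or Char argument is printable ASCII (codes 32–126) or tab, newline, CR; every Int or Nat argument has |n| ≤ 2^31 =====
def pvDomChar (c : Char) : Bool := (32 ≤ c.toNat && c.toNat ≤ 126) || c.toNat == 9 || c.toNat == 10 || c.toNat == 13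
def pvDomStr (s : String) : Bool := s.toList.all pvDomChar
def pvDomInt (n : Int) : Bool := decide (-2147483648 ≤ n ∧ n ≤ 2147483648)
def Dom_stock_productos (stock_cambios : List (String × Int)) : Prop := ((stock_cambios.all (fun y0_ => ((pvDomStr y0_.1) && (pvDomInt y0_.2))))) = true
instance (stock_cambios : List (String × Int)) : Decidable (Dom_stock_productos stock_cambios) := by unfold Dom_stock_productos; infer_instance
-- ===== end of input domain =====

-- B replaces A's two-phase group-into-lists-then-scan-each-list-with-min/max-helpers by a single
-- pass that keeps a running (min, max) pair per product (objective: simpler).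

-- ===== PORT A =====
-- helper 'minimo' of A: first element, then a range(1, len) scan
def pvMinimo (cantidad : List Int) : Int :=
  (PySem.List.pyRange 1 (PySem.List.len cantidad) 1).foldl
    (fun minimo i =>
      if PySem.List.pyGetD cantidad i 0 < minimo then PySem.List.pyGetD cantidad i 0 else minimo)
    (PySem.List.pyGetD cantidad 0 0)

-- helper 'maximo' of A (note the '>=' in its update)
def pvMaximo (cantidad : List Int) : Int :=
  (PySem.List.pyRange 1 (PySem.List.len cantidad) 1).foldl
    (fun maximo i =>
      if maximo ≤ PySem.List.pyGetD cantidad i 0 then PySem.List.pyGetD cantidad i 0 else maximo)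
    (PySem.List.pyGetD cantidad 0 0)

def stock_productos (stock_cambios : List (String × Int)) : List (String × Int × Int) :=
  let dictAux : PySem.Dict String (List Int) :=
    stock_cambios.foldl
      (fun d p =>
        if d.contains p.1 = false then d.insert p.1 [p.2]
        else d.insert p.1 (d.getD p.1 [] ++ [p.2]))
      PySem.Dict.empty
  let lista_claves : List String := dictAux.keys
  (lista_claves.foldl
      (fun res k =>
        let historial : List Int := dictAux.getD k []
        res.insert k (pvMinimo historial, pvMaximo historial))
      (PySem.Dict.empty : PySem.Dict String (Int × Int))).items

-- ===== PORT B =====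
def stock_productos_alt (stock_cambios : List (String × Int)) : List (String × Int × Int) :=
  (stock_cambios.foldl
      (fun res p =>
        match res.get? p.1 with
        | none => res.insert p.1 (p.2, p.2)
        | some (lo, hi) => res.insert p.1 (min lo p.2, max hi p.2))
      (PySem.Dict.empty : PySem.Dict String (Int × Int))).items

-- ===== PRECONDITION & SPEC =====
def Spec_stock_productos (stock_cambios : List (String × Int)) (out : List (String × Int × Int)) : Prop := out = stock_productos_alt stock_cambios
instance (stock_cambios : List (String × Int)) (out : List (String × Int × Int)) : Decidable (Spec_stock_productos stock_cambios out) := by unfold Spec_stock_productos; infer_instance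

-- ===== CLAIM (what is proved, stated in full; the proofs are below) =====
def Claim_equal_stock_productos : Prop := ∀ (stock_cambios : List (String × Int)), Dom_stock_productos stock_cambios → Spec_stock_productos stock_cambios (stock_productos stock_cambios)

-- ===== LEMMAS AND PROOFS =====

-- running-pair update of B, as a function on the optional dict entry
def pvComb (o : Option (Int × Int)) (q : Int) : Int × Int :=
  match o with
  | none => (q, q)
  | some (lo, hi) => (min lo q, max hi q)

-- the quantities recorded for product k
def pvGroup (l : List (String × Int)) (k : String) : List Int :=
  (l.filter (fun p => p.1 == k)).map (·.2)

lemma pvStepA_eq_modify :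
    (fun (d : PySem.Dict String (List Int)) (p : String × Int) =>
        if d.contains p.1 = false then d.insert p.1 [p.2]
        else d.insert p.1 (d.getD p.1 [] ++ [p.2]))
    = (fun d p => d.modify p.1 [] (· ++ [p.2])) := by
  funext d p
  by_cases h : d.contains p.1 = false
  · rw [if_pos h]
    simp [PySem.Dict.modify, PySem.Dict.getD_of_not_contains d [] h]
  · rw [if_neg h]
    simp [PySem.Dict.modify]

lemma pvStepB_eq_insert :
    (fun (res : PySem.Dict String (Int × Int)) (p : String × Int) =>
        match res.get? p.1 with
        | none => res.insert p.1 (p.2, p.2)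
        | some (lo, hi) => res.insert p.1 (min lo p.2, max hi p.2))
    = (fun res p => res.insert p.1 (pvComb (res.get? p.1) p.2)) := by
  funext res p
  cases h : res.get? p.1 with
  | none => simp [pvComb]
  | some s => cases s; simp [pvComb]

lemma pvBfold_get? (l : List (String × Int)) (r : PySem.Dict String (Int × Int)) (k : String) :
    (l.foldl (fun res p => res.insert p.1 (pvComb (res.get? p.1) p.2)) r).get? k
      = (pvGroup l k).foldl (fun o q => some (pvComb o q)) (r.get? k) := by
  induction l generalizing r with
  | nil => simp [pvGroup]
  | cons p t ih =>
      by_cases h : p.1 = k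
      · subst h
        simp only [List.foldl_cons, ih, pvGroup, List.filter_cons, beq_self_eq_true, if_true,
          List.map_cons, PySem.Dict.get?_insert_self]
      · have hb : (p.1 == k) = false := beq_eq_false_iff_ne.mpr h
        rw [List.foldl_cons, ih, PySem.Dict.get?_insert_of_ne _ _ (Ne.symm h)]
        simp [pvGroup, hb]

lemma pvFoldl_some (t : List Int) (s : Int × Int) :
    t.foldl (fun o q => some (pvComb o q)) (some s)
      = some (t.foldl (fun s q => (min s.1 q, max s.2 q)) s) := by
  induction t generalizing s with
  | nil => rfl
  | cons q t ih =>
      cases s with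
      | mk a b =>
          simp only [List.foldl_cons]
          have h1 : pvComb (some (a, b)) q = (min a q, max b q) := rfl
          rw [h1]
          exact ih (min a q, max b q)

lemma pvMinimo_cons (x : Int) (t : List Int) : pvMinimo (x :: t) = t.foldl min x := by
  have hf : (fun (m y : Int) => if y < m then y else m) = min := by
    funext m y; simp only [min_def]; split_ifs <;> omega
  unfold pvMinimo
  exact (PySem.List.foldl_pyRange_pyGetD (x :: t) 0 (fun m y => if y < m then y else m)
      (PySem.List.pyGetD (x :: t) 0 0) (by norm_num)).trans (by rw [hf]; norm_num [pysem])

lemma pvMaximo_cons (x : Int) (t : List Int) : pvMaximo (x :: t) = t.foldl max x := by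
  have hf : (fun (m y : Int) => if m ≤ y then y else m) = max := by
    funext m y; simp only [max_def]
  unfold pvMaximo
  exact (PySem.List.foldl_pyRange_pyGetD (x :: t) 0 (fun m y => if m ≤ y then y else m)
      (PySem.List.pyGetD (x :: t) 0 0) (by norm_num)).trans (by rw [hf]; norm_num [pysem])

-- ===== VERDICT (by name: the statement is the Claim_ definition above) =====
theorem stock_productos_spec : Claim_equal_stock_productos := by
  intro l _
  unfold Spec_stock_productos stock_productos stock_productos_alt
  rw [pvStepA_eq_modify, pvStepB_eq_insert]
  set dictAux := l.foldl (fun d p => d.modify p.1 [] (· ++ [p.2]))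
      (PySem.Dict.empty : PySem.Dict String (List Int)) with hAux
  set B := l.foldl (fun res p => res.insert p.1 (pvComb (res.get? p.1) p.2))
      (PySem.Dict.empty : PySem.Dict String (Int × Int)) with hB
  have hkeysA : dictAux.keys = PySem.Set.ofList (l.map (·.1)) := by
    rw [hAux]
    exact (PySem.Dict.keys_foldl_modify_key l (fun p => p.1) []
        (fun d p => (· ++ [p.2])) PySem.Dict.empty).trans
      (by simp [PySem.Set.update_nil_left])
  have hkeysB : B.keys = PySem.Set.ofList (l.map (·.1)) := by
    rw [hB]
    exact (PySem.Dict.keys_foldl_insert_key l (fun p => p.1)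
        (fun res p => pvComb (res.get? p.1) p.2) PySem.Dict.empty).trans
      (by simp [PySem.Set.update_nil_left])
  have hnodup : dictAux.keys.Nodup := by rw [hkeysA]; exact PySem.Set.nodup_ofList _
  have hBnodup : B.keys.Nodup := by rw [hkeysB]; exact PySem.Set.nodup_ofList _
  have hitems : (dictAux.keys.foldl
      (fun res k => res.insert k (pvMinimo (dictAux.getD k []), pvMaximo (dictAux.getD k [])))
      (PySem.Dict.empty : PySem.Dict String (Int × Int))).items
      = dictAux.keys.map (fun k => (k, (pvMinimo (dictAux.getD k []), pvMaximo (dictAux.getD k [])))) := by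
    exact (PySem.Dict.items_foldl_insert_fresh dictAux.keys (fun a => a)
        (fun a => (pvMinimo (dictAux.getD a []), pvMaximo (dictAux.getD a [])))
        PySem.Dict.empty (by intro a _; simp) (by simpa using hnodup)).trans
      (by simp [show (PySem.Dict.empty : PySem.Dict String (Int × Int)).items = [] from rfl])
  have hBitems : B.items = B.keys.map (fun k => (k, B.getD k (0, 0))) :=
    PySem.Dict.items_eq_map_keys B hBnodup (0, 0)
  rw [hitems, hBitems, hkeysA, hkeysB]
  apply List.map_congr_left
  intro k hk
  have hmem : k ∈ l.map (·.1) := (PySem.Set.mem_ofList _ _).mp hk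
  have hgrp : pvGroup l k ≠ [] := by
    obtain ⟨p, hp, hpk⟩ := List.mem_map.mp hmem
    have hin : p.2 ∈ pvGroup l k :=
      List.mem_map.mpr ⟨p, List.mem_filter.mpr ⟨hp, by simp [hpk]⟩, rfl⟩
    exact fun h => by simp [h] at hin
  obtain ⟨x, t, hxt⟩ := List.exists_cons_of_ne_nil hgrp
  have hgetA : dictAux.getD k [] = pvGroup l k := by
    rw [hAux]
    exact (PySem.Dict.getD_foldl_modify_append l PySem.Dict.empty k).trans (by simp [pvGroup])
  have hgetB : B.get? k = some (t.foldl (fun s q => (min s.1 q, max s.2 q)) (x, x)) := by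
    rw [hB, pvBfold_get?, hxt]
    simp only [List.foldl_cons, PySem.Dict.get?_empty]
    have h1 : pvComb none x = (x, x) := rfl
    rw [h1]
    exact pvFoldl_some t (x, x)
  have hpair : t.foldl (fun s q => (min s.1 q, max s.2 q)) (x, x)
      = (t.foldl min x, t.foldl max x) := by
    exact PySem.List.foldl_prod_mk min max t x x
  rw [hgetA, hxt, pvMinimo_cons, pvMaximo_cons, PySem.Dict.getD_eq_get?_getD, hgetB]
  simp [hpair]
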